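-- pv_equiv track=rewrite | github.com/sha5b/Code-Analyzer-for-AI | src/project_analyzer/analyzers/languages/javascript.py | _extract_jsdoc
-- ===== SOURCE A (Python) =====
-- from typing import Dict, List, Optional, Any, Tuple
--
-- def _extract_jsdoc(lines: List[str], start: int) -> Optional[Tuple[str, int]]:
--     """Extract JSDoc comment block and return (comment, end_line)"""
--     if not lines[start].strip().startswith('/**'):
--         return None
--
--     comment_lines = []
--     i = start
--
--     while i < len(lines) and '*/' not in lines[i]:
--         comment_lines.append(lines[i].strip().lstrip('* '))
--         i += 1
--
--     if i < len(lines) and '*/' in lines[i]: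
--         comment_lines.append(lines[i].strip().lstrip('* ').rstrip('*/'))
--         return '\n'.join(comment_lines), i + 1
--
--     return None
-- ===== SOURCE B (Python) =====
-- def _extract_jsdoc(lines, start):
--     """Extract JSDoc comment block and return (comment, end_line)"""
--     if not lines[start].strip().startswith('/**'):
--         return None
--
--     # Phase 1: locate the closing line (first index >= start whose line contains '*/').
--     end = next((i for i in range(start, len(lines)) if '*/' in lines[i]), None)
--     if end is None:
--         return None
--
--     # Phase 2: build the comment text in a separate pass.
--     parts = [lines[j].strip().lstrip('* ') for j in range(start, end)]
--     parts.append(lines[end].strip().lstrip('* ').rstrip('*/'))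
--     return '\n'.join(parts), end + 1
-- ===== Notes on version B (the rewrite author's own statement) =====
-- stated objective: alternative
-- what changed: B separates boundary-location (a search for the first line containing '*/') from text-construction (a comprehension over the found range), instead of A's single interleaved while-loop that accumulates cleaned lines while scanning.
import Mathlib
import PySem

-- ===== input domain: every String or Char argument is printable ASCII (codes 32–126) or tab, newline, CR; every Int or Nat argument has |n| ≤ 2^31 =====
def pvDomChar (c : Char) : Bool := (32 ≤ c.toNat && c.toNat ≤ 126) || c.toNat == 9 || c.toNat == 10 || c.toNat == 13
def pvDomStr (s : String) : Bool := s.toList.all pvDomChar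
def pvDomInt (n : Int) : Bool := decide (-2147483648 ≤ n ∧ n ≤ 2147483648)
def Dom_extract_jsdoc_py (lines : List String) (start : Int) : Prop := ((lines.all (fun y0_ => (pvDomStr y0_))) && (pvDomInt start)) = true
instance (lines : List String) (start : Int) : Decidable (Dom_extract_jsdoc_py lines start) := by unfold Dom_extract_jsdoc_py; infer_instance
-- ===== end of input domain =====

-- B separates boundary-location from text-construction instead of A's interleaved scan-and-accumulate loop; equivalence on the return value.

-- shared helper ports of the chained Python method calls (both sources use the identical expressions)
-- line.strip().lstrip('* ')  — lstrip('* ') drops leading '*' and ' ' chars; exact, hand-ported via dropWhile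
def jsClean (s : String) : String :=
  String.ofList ((PySem.Str.strip s).toList.dropWhile (fun c => c == '*' || c == ' '))

-- line.strip().lstrip('* ').rstrip('*/')  — rstrip('*/') drops trailing '*' and '/' chars; exact, via rdropWhile
def jsLast (s : String) : String :=
  String.ofList (List.rdropWhile (fun c => c == '*' || c == '/') (jsClean s).toList)

-- ===== PORT A =====
-- the while-loop of A: scans from i, accumulating cleaned lines, until '*/' or end of list
def jsdocLoopA (lines : List String) (i : Int) (acc : List String) : Option (String × Int) :=
  if _h : i < (lines.length : Int) then
    -- lines[i]: i ≥ -lines.length throughout the loop under Pre_, so getD is exact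
    if PySem.Str.isIn "*/" ((PySem.List.pyGet? lines i).getD "") then
      some (PySem.Str.join "\n" (acc ++ [jsLast ((PySem.List.pyGet? lines i).getD "")]), i + 1)
    else
      jsdocLoopA lines (i + 1) (acc ++ [jsClean ((PySem.List.pyGet? lines i).getD "")])
  else none
termination_by ((lines.length : Int) - i).toNat
decreasing_by omega

def extract_jsdoc_py (lines : List String) (start : Int) : Option (String × Int) :=
  match PySem.List.pyGet? lines start with
  | none => none        -- Python raises IndexError here; excluded by Pre_
  | some s0 =>
    if PySem.Str.startswith (PySem.Str.strip s0) "/**" then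
      jsdocLoopA lines start []
    else none

-- ===== PORT B =====
def extract_jsdoc_py_alt (lines : List String) (start : Int) : Option (String × Int) :=
  match PySem.List.pyGet? lines start with
  | none => none        -- Python raises IndexError here; excluded by Pre_
  | some s0 =>
    if PySem.Str.startswith (PySem.Str.strip s0) "/**" then
      match (PySem.List.pyRange start (lines.length : Int) 1).find?
          (fun j => PySem.Str.isIn "*/" ((PySem.List.pyGet? lines j).getD "")) with
      | none => none
      | some e =>
        some (PySem.Str.join "\n"
          ((PySem.List.pyRange start e 1).map (fun j => jsClean ((PySem.List.pyGet? lines j).getD ""))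
            ++ [jsLast ((PySem.List.pyGet? lines e).getD "")]), e + 1)
    else none

-- ===== PRECONDITION & SPEC =====
-- Pre_ excludes exactly the out-of-range starts on which Python's `lines[start]` raises IndexError (B raises there too).
def Pre_extract_jsdoc_py (lines : List String) (start : Int) : Prop :=
  PySem.Raise.InRange lines.length start
instance (lines : List String) (start : Int) : Decidable (Pre_extract_jsdoc_py lines start) := by unfold Pre_extract_jsdoc_py; infer_instance

def pvWitness_extract_jsdoc_py : List String × Int := (["/**", " * hi", " */"], 0)

def Spec_extract_jsdoc_py (lines : List String) (start : Int) (out : Option (String × Int)) : Prop := out = extract_jsdoc_py_alt lines start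
instance (lines : List String) (start : Int) (out : Option (String × Int)) : Decidable (Spec_extract_jsdoc_py lines start out) := by unfold Spec_extract_jsdoc_py; infer_instance

-- ===== CLAIM (what is proved, stated in full; the proofs are below) =====
def Claim_equal_extract_jsdoc_py : Prop := ∀ (lines : List String) (start : Int), Dom_extract_jsdoc_py lines start → Pre_extract_jsdoc_py lines start → Spec_extract_jsdoc_py lines start (extract_jsdoc_py lines start)

-- ===== LEMMAS AND PROOFS =====

-- A's loop computes exactly B's find-then-build decomposition.
theorem jsdocLoopA_eq (lines : List String) (i : Int) (acc : List String) :
    jsdocLoopA lines i acc =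
      match (PySem.List.pyRange i (lines.length : Int) 1).find?
          (fun j => PySem.Str.isIn "*/" ((PySem.List.pyGet? lines j).getD "")) with
      | none => none
      | some e =>
        some (PySem.Str.join "\n"
          (acc ++ (PySem.List.pyRange i e 1).map (fun j => jsClean ((PySem.List.pyGet? lines j).getD ""))
               ++ [jsLast ((PySem.List.pyGet? lines e).getD "")]), e + 1) := by
  rw [jsdocLoopA]
  by_cases h : i < (lines.length : Int)
  · rw [dif_pos h, PySem.List.pyRange_one_cons h]
    by_cases hp : PySem.Str.isIn "*/" ((PySem.List.pyGet? lines i).getD "") = true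
    · rw [if_pos hp, List.find?_cons_of_pos (p := fun j => PySem.Str.isIn "*/" ((PySem.List.pyGet? lines j).getD "")) hp]
      dsimp only
      rw [PySem.List.pyRange_one_eq_nil (le_refl i)]
      simp only [List.map_nil, List.append_nil]
    · rw [if_neg hp, List.find?_cons_of_neg (p := fun j => PySem.Str.isIn "*/" ((PySem.List.pyGet? lines j).getD "")) hp,
        jsdocLoopA_eq lines (i + 1) (acc ++ [jsClean ((PySem.List.pyGet? lines i).getD "")])]
      cases hfind : (PySem.List.pyRange (i + 1) (lines.length : Int) 1).find?
          (fun j => PySem.Str.isIn "*/" ((PySem.List.pyGet? lines j).getD "")) with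
      | none => rfl
      | some e =>
        have he : i + 1 ≤ e :=
          (PySem.List.mem_pyRange_one.mp (List.mem_of_find?_eq_some hfind)).1
        dsimp only
        rw [PySem.List.pyRange_one_cons (by omega : i < e)]
        simp only [List.map_cons, List.cons_append, List.append_assoc, List.nil_append]
  · rw [dif_neg h, PySem.List.pyRange_one_eq_nil (by omega)]
    rfl
termination_by ((lines.length : Int) - i).toNat
decreasing_by omega

-- ===== VERDICT (by name: the statement is the Claim_ definition above) =====
theorem extract_jsdoc_py_spec : Claim_equal_extract_jsdoc_py := by
  intro lines start _ _
  unfold Spec_extract_jsdoc_py extract_jsdoc_py extract_jsdoc_py_alt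
  cases PySem.List.pyGet? lines start with
  | none => rfl
  | some s0 =>
    dsimp only
    by_cases hs : PySem.Str.startswith (PySem.Str.strip s0) "/**" = true
    · rw [if_pos hs, if_pos hs, jsdocLoopA_eq lines start []]
      cases (PySem.List.pyRange start (lines.length : Int) 1).find?
          (fun j => PySem.Str.isIn "*/" ((PySem.List.pyGet? lines j).getD "")) with
      | none => rfl
      | some e => dsimp only; rw [List.nil_append]
    · rw [if_neg hs, if_neg hs]
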